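-- pv_equiv track=rewrite | github.com/andywarburton/gr3ml1n-cyberdeck | TOUCHSCREEN/sd/apps/battery_timer/app.py | _eu_dst
-- ===== SOURCE A (Python) =====
-- def _eu_dst(year, month, mday, utc_hour):
--     if month < 3 or month > 10:
--         return False
--     if 3 < month < 10:
--         return True
--
--     def _last_sun(y, m):
--         t = [0, 3, 2, 5, 0, 3, 5, 1, 4, 6, 2, 4]
--         mlen = [31, 29 if (y % 4 == 0 and (y % 100 != 0 or y % 400 == 0)) else 28,
--                 31, 30, 31, 30, 31, 31, 30, 31, 30, 31]
--         d = mlen[m - 1]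
--         while True:
--             yy = y - (1 if m < 3 else 0)
--             if (yy + yy // 4 - yy // 100 + yy // 400 + t[m - 1] + d) % 7 == 0:
--                 return d
--             d -= 1
--
--     ls = _last_sun(year, month)
--     if month == 3:
--         if mday < ls:
--             return False
--         if mday > ls:
--             return True
--         return utc_hour >= 1
--     else:
--         if mday < ls:
--             return True
--         if mday > ls:
--             return False
--         return utc_hour < 1
-- ===== SOURCE B (Python) =====
-- def _eu_dst(year, month, mday, utc_hour):
--     if month < 3 or month > 10:
--         return False
--     if 3 < month < 10:
--         return True
--     # month is 3 or 10 (31-day months). Closed-form last Sunday: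
--     # Sakamoto weekday offset: 2 for March, 6 for October; weekday 0 = Sunday.
--     offset = 2 if month == 3 else 6
--     w = (year + year // 4 - year // 100 + year // 400 + offset + 31) % 7
--     last_sunday = 31 - w
--     if month == 3:
--         return mday > last_sunday or (mday == last_sunday and utc_hour >= 1)
--     return mday < last_sunday or (mday == last_sunday and utc_hour < 1)
-- ===== Notes on version B (the rewrite author's own statement) =====
-- stated objective: simpler
-- what changed: B replaces A's decrementing while-loop search for the last Sunday (Sakamoto weekday test per candidate day) with a single closed-form expression last_sunday = 31 - ((year + year//4 - year//100 + year//400 + offset + 31) % 7), and folds the tie-breaking if-chain into one boolean expression.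
import Mathlib
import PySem

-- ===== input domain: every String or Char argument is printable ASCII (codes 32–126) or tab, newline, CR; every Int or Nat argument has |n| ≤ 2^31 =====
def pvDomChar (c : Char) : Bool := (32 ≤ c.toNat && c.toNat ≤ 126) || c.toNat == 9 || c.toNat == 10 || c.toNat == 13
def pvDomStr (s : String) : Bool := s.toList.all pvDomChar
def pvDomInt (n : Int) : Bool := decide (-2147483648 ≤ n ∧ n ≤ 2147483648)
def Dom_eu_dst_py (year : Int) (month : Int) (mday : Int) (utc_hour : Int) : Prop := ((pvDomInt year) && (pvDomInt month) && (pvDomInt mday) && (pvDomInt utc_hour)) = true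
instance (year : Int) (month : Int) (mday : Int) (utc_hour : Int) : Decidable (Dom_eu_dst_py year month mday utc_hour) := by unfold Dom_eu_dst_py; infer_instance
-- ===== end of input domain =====

-- B replaces A's decrementing last-Sunday search loop by a closed-form modular expression (simpler; same cost class).

-- ===== PORT A =====
-- the table t and the month-length list of _last_sun
def euT : List Int := [0, 3, 2, 5, 0, 3, 5, 1, 4, 6, 2, 4]
def euMlen (y : Int) : List Int :=
  [31, if PySem.Int.mod y 4 = 0 ∧ (PySem.Int.mod y 100 ≠ 0 ∨ PySem.Int.mod y 400 = 0) then 29 else 28,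
   31, 30, 31, 30, 31, 31, 30, 31, 30, 31]

-- the `while True:` of _last_sun; fuel is only a totality guard (the loop finds a Sunday within 7 steps)
def lastSunLoop (c : Int) (d : Int) : Nat → Int
  | 0 => d
  | n + 1 => if PySem.Int.mod (c + d) 7 = 0 then d else lastSunLoop c (d - 1) n

-- _last_sun(y, m); list indexing is in range for the months reaching it (3..10), so .getD 0 is unreachable
def lastSun (y : Int) (m : Int) : Int :=
  let d := (PySem.List.pyGet? (euMlen y) (m - 1)).getD 0
  let yy := y - (if m < 3 then 1 else 0)
  let c := yy + PySem.Int.floordiv yy 4 - PySem.Int.floordiv yy 100 + PySem.Int.floordiv yy 400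
             + (PySem.List.pyGet? euT (m - 1)).getD 0
  lastSunLoop c d 40

def eu_dst_py (year : Int) (month : Int) (mday : Int) (utc_hour : Int) : Bool :=
  if month < 3 ∨ month > 10 then false
  else if 3 < month ∧ month < 10 then true
  else
    let ls := lastSun year month
    if month = 3 then
      if mday < ls then false
      else if mday > ls then true
      else decide (utc_hour ≥ 1)
    else
      if mday < ls then true
      else if mday > ls then false
      else decide (utc_hour < 1)

-- ===== PORT B =====
def eu_dst_py_alt (year : Int) (month : Int) (mday : Int) (utc_hour : Int) : Bool :=
  if month < 3 ∨ month > 10 then false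
  else if 3 < month ∧ month < 10 then true
  else
    -- month is 3 or 10 (31-day months); Sakamoto offset 2 for March, 6 for October; weekday 0 = Sunday
    let offset : Int := if month = 3 then 2 else 6
    let w := PySem.Int.mod (year + PySem.Int.floordiv year 4 - PySem.Int.floordiv year 100
                              + PySem.Int.floordiv year 400 + offset + 31) 7
    let lastSunday := 31 - w
    if month = 3 then
      decide (mday > lastSunday) || (decide (mday = lastSunday) && decide (utc_hour ≥ 1))
    else
      decide (mday < lastSunday) || (decide (mday = lastSunday) && decide (utc_hour < 1))

-- ===== PRECONDITION & SPEC =====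
def Spec_eu_dst_py (year : Int) (month : Int) (mday : Int) (utc_hour : Int) (out : Bool) : Prop := out = eu_dst_py_alt year month mday utc_hour
instance (year : Int) (month : Int) (mday : Int) (utc_hour : Int) (out : Bool) : Decidable (Spec_eu_dst_py year month mday utc_hour out) := by unfold Spec_eu_dst_py; infer_instance

-- ===== CLAIM (what is proved, stated in full; the proofs are below) =====
def Claim_equal_eu_dst_py : Prop := ∀ (year : Int) (month : Int) (mday : Int) (utc_hour : Int), Dom_eu_dst_py year month mday utc_hour → Spec_eu_dst_py year month mday utc_hour (eu_dst_py year month mday utc_hour)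

-- ===== LEMMAS AND PROOFS =====

-- A's decrementing search returns the closed form d0 - (c + d0) % 7 once given enough fuel
theorem lastSunLoop_closed_gen (c : Int) :
    ∀ (n : Nat) (d : Int), (c + d) % 7 < (n : Int) → lastSunLoop c d n = d - (c + d) % 7 := by
  intro n
  induction n with
  | zero => intro d h; exfalso; omega
  | succ n ih =>
    intro d h
    simp only [lastSunLoop]
    by_cases h0 : PySem.Int.mod (c + d) 7 = 0
    · rw [if_pos h0]
      rw [PySem.Int.mod_eq_emod_of_pos (by norm_num : (0:Int) < 7)] at h0
      omega
    · rw [if_neg h0]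
      rw [PySem.Int.mod_eq_emod_of_pos (by norm_num : (0:Int) < 7)] at h0
      have h1 : (c + (d - 1)) % 7 < (n : Int) := by push_cast at h ⊢; omega
      rw [ih (d - 1) h1]
      omega

theorem lastSunLoop_closed (c : Int) : lastSunLoop c 31 40 = 31 - PySem.Int.mod (c + 31) 7 := by
  rw [PySem.Int.mod_eq_emod_of_pos (by norm_num : (0:Int) < 7)]
  rw [lastSunLoop_closed_gen c 40 31 (by omega)]

theorem lastSun_eq (y m : Int) (h : m = 3 ∨ m = 10) :
    lastSun y m = 31 - PySem.Int.mod (y + PySem.Int.floordiv y 4 - PySem.Int.floordiv y 100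
                                        + PySem.Int.floordiv y 400 + (if m = 3 then 2 else 6) + 31) 7 := by
  rcases h with h | h <;> subst h <;>
    simp [lastSun, euMlen, euT, PySem.List.pyGet?, PySem.List.pyIdx?, lastSunLoop_closed]

-- ===== VERDICT (by name: the statement is the Claim_ definition above) =====
theorem eu_dst_py_spec : Claim_equal_eu_dst_py := by
  intro year month mday utc_hour _
  unfold Spec_eu_dst_py eu_dst_py eu_dst_py_alt
  by_cases h1 : month < 3 ∨ month > 10
  · simp [h1]
  · by_cases h2 : 3 < month ∧ month < 10
    · simp [h1, h2]
    · have hm : month = 3 ∨ month = 10 := by omega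
      rw [lastSun_eq year month hm]
      simp only [if_neg h1, if_neg h2]
      rcases hm with h | h <;> subst h <;>
        simp only [if_neg (by norm_num : ¬(10:Int) = 3)] <;>
        · generalize 31 - PySem.Int.mod _ 7 = ls
          split_ifs <;> simp_all <;> try omega
          all_goals
            have h3 : mday = ls := by omega
            subst h3
            simp
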